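-- pv_equiv track=rewrite | github.com/NoahBlack012/ecosystem | Animal.py | end_found
-- ===== SOURCE A (Python) =====
-- def end_found(moves, x, y, foodx, foody):
--     for move in moves:
--         if move == "U":
--             y += 1
--         elif move == "D":
--             y -= 1
--         elif move == "L":
--             x -= 1
--         elif move == "R":
--             x += 1
--     if x == foodx and y == foody:
--         return True
--     else:
--         return False
-- ===== SOURCE B (Python) =====
-- def end_found(moves, x, y, foodx, foody):
--     dx = moves.count("R") - moves.count("L")
--     dy = moves.count("U") - moves.count("D")
--     return x + dx == foodx and y + dy == foody
-- ===== Notes on version B (the rewrite author's own statement) =====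
-- stated objective: simpler
-- what changed: Replaces the accumulating simulation loop by a closed-form net displacement computed from counts of each move character, compared in one boolean expression.
import Mathlib
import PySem

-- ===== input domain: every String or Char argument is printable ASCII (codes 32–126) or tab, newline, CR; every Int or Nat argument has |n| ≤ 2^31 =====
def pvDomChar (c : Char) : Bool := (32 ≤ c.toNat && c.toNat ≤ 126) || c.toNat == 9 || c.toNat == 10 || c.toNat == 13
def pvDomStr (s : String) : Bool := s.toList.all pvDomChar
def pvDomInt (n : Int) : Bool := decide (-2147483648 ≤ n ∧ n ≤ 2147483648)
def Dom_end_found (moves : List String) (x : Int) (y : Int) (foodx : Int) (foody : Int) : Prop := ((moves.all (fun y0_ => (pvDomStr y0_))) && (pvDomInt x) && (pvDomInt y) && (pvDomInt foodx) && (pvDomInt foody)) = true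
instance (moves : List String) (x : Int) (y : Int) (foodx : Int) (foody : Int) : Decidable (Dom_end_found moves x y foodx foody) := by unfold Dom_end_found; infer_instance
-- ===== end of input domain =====

-- B replaces the step-by-step simulation by a closed-form net displacement from move counts (objective: simpler).

-- ===== PORT A =====
def end_found (moves : List String) (x : Int) (y : Int) (foodx : Int) (foody : Int) : Bool :=
  let (x, y) := moves.foldl (fun (st : Int × Int) move =>
    let (x, y) := st
    if move == "U" then (x, y + 1)
    else if move == "D" then (x, y - 1)
    else if move == "L" then (x - 1, y)
    else if move == "R" then (x + 1, y)
    else (x, y)) (x, y)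
  if x == foodx && y == foody then true else false

-- ===== PORT B =====
-- closed form from counts of each move
def end_found_alt (moves : List String) (x : Int) (y : Int) (foodx : Int) (foody : Int) : Bool :=
  let dx : Int := (PySem.List.count moves "R" : Int) - (PySem.List.count moves "L" : Int)
  let dy : Int := (PySem.List.count moves "U" : Int) - (PySem.List.count moves "D" : Int)
  (x + dx == foodx) && (y + dy == foody)

-- ===== PRECONDITION & SPEC =====
def Spec_end_found (moves : List String) (x : Int) (y : Int) (foodx : Int) (foody : Int) (out : Bool) : Prop := out = end_found_alt moves x y foodx foody
instance (moves : List String) (x : Int) (y : Int) (foodx : Int) (foody : Int) (out : Bool) : Decidable (Spec_end_found moves x y foodx foody out) := by unfold Spec_end_found; infer_instance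

-- ===== CLAIM (what is proved, stated in full; the proofs are below) =====
def Claim_equal_end_found : Prop := ∀ (moves : List String) (x : Int) (y : Int) (foodx : Int) (foody : Int), Dom_end_found moves x y foodx foody → Spec_end_found moves x y foodx foody (end_found moves x y foodx foody)

-- ===== LEMMAS AND PROOFS =====
theorem end_found_fold (moves : List String) (x y : Int) :
    moves.foldl (fun (st : Int × Int) move =>
      let (x, y) := st
      if move == "U" then (x, y + 1)
      else if move == "D" then (x, y - 1)
      else if move == "L" then (x - 1, y)
      else if move == "R" then (x + 1, y)
      else (x, y)) (x, y)
    = (x + ((PySem.List.count moves "R" : Int) - (PySem.List.count moves "L" : Int)),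
       y + ((PySem.List.count moves "U" : Int) - (PySem.List.count moves "D" : Int))) := by
  induction moves generalizing x y with
  | nil => simp [PySem.List.count]
  | cons m ms ih =>
    simp only [List.foldl_cons]
    by_cases hU : m = "U" <;> by_cases hD : m = "D" <;> by_cases hL : m = "L" <;> by_cases hR : m = "R" <;>
      simp_all [PySem.List.count] <;> omega

-- ===== VERDICT (by name: the statement is the Claim_ definition above) =====
theorem end_found_spec : Claim_equal_end_found := by
  intro moves x y foodx foody _
  unfold Spec_end_found end_found end_found_alt
  rw [end_found_fold]
  simp [beq_eq_decide]
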